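-- pv_equiv track=rewrite | github.com/paintception/ZeroAccuracySystems | blstm_ctc_net/word_dataset_with_timesteps.py | get_words_from_indexes
-- ===== SOURCE A (Python) =====
-- def get_words_from_indexes(indexes, values, n_words, pad_to=1):
--     words = [" " * pad_to] * n_words
--
--     w_begin = 0
--     for idx, iv in enumerate(indexes):
--         if idx == len(indexes) - 1:
--             words[iv[0]] = "".join(values[w_begin:]).ljust(pad_to)
--         elif iv[0] != indexes[idx + 1][0]:
--             words[iv[0]] = "".join(values[w_begin:idx + 1]).ljust(pad_to)
--             w_begin = idx + 1
--
--     return words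
-- ===== SOURCE B (Python) =====
-- def get_words_from_indexes(indexes, values, n_words, pad_to=1):
--     # Two-pointer run scan: consume each run of equal word-indexes at once.
--     words = [" " * pad_to] * n_words
--     pos = 0
--     i = 0
--     n = len(indexes)
--     while i < n:
--         k = indexes[i][0]
--         j = i + 1
--         while j < n and indexes[j][0] == k:
--             j += 1
--         if j < n:
--             words[k] = "".join(values[pos:pos + (j - i)]).ljust(pad_to)
--         else:
--             words[k] = "".join(values[pos:]).ljust(pad_to)
--         pos += j - i
--         i = j
--     return words
-- ===== Notes on version B (the rewrite author's own statement) =====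
-- stated objective: alternative
-- what changed: A walks enumerate(indexes) element by element with a lookahead at indexes[idx+1] to detect word boundaries; B is a two-pointer scan that consumes each run of equal word-indexes at once and slices values by run length, special-casing the final run's open-ended slice.
import Mathlib
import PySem

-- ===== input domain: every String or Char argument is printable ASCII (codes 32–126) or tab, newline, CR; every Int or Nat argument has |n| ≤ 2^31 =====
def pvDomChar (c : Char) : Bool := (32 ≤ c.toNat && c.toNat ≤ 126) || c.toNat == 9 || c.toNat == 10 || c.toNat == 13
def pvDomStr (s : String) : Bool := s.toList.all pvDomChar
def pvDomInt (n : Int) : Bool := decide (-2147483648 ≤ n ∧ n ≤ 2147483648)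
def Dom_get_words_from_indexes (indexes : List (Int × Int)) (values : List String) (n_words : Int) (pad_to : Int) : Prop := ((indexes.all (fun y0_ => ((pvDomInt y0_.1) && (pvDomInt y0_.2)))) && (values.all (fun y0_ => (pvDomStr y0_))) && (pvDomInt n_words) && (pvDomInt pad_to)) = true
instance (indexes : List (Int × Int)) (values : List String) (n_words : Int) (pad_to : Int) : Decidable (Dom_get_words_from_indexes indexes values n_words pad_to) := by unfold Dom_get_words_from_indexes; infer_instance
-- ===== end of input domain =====

-- B replaces A's per-element enumerate loop with lookahead by a two-pointer scan that
-- consumes each run of equal word-indexes at once (objective: alternative decomposition).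

-- shared Python-semantics helpers (both Pythons perform the same " "*n, ljust and words[i]= steps)
-- " " * n  (negative n gives "")
def pySpaces (n : Int) : String := String.ofList (List.replicate n.toNat ' ')
-- s.ljust(w): pad with spaces on the right up to width w (never truncates)
def pyLjust (s : String) (w : Int) : String :=
  String.ofList (s.toList ++ List.replicate (w.toNat - s.toList.length) ' ')
-- xs[i] = v with Python's negative-index wrap; out-of-range raises IndexError in
-- Python (excluded by Pre_), here it leaves the list unchanged
def pySetItem (xs : List String) (i : Int) (v : String) : List String :=
  let j := if i < 0 then i + xs.length else i
  if 0 ≤ j ∧ j < xs.length then xs.set j.toNat v else xs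

-- ===== PORT A =====
-- the for-loop over enumerate(indexes): structural recursion on the remaining list,
-- carrying the running index idx and w_begin; the lookahead indexes[idx + 1] is read
-- from the full list exactly as A does
def aGo (indexes : List (Int × Int)) (values : List String) (pad_to : Int) :
    List (Int × Int) → Nat → List String → Int → List String
  | [], _, words, _ => words
  | iv :: rest, idx, words, wb =>
    if (idx : Int) = (indexes.length : Int) - 1 then
      aGo indexes values pad_to rest (idx + 1)
        (pySetItem words iv.1
          (pyLjust (PySem.Str.join "" (PySem.List.slice values (some wb) none)) pad_to)) wb
    else
      match PySem.List.pyGet? indexes ((idx : Int) + 1) with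
      | some nxt =>
        if iv.1 ≠ nxt.1 then
          aGo indexes values pad_to rest (idx + 1)
            (pySetItem words iv.1
              (pyLjust (PySem.Str.join ""
                (PySem.List.slice values (some wb) (some ((idx : Int) + 1)))) pad_to))
            ((idx : Int) + 1)
        else aGo indexes values pad_to rest (idx + 1) words wb
      | none => aGo indexes values pad_to rest (idx + 1) words wb

def get_words_from_indexes (indexes : List (Int × Int)) (values : List String) (n_words : Int) (pad_to : Int) : List String :=
  aGo indexes values pad_to indexes 0 (List.replicate n_words.toNat (pySpaces pad_to)) 0

-- ===== PORT B =====
-- Source B's outer while loop: recursion on the remaining list; the inner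
-- while j < n and indexes[j][0] == k loop is the takeWhile/dropWhile split
def bGo (values : List String) (pad_to : Int) :
    List (Int × Int) → List String → Int → List String
  | [], words, _ => words
  | iv :: rest, words, pos =>
    let grp := rest.takeWhile (fun p => p.1 == iv.1)
    let rest' := rest.dropWhile (fun p => p.1 == iv.1)
    let L : Int := 1 + (grp.length : Int)
    match rest' with
    | [] =>
      pySetItem words iv.1
        (pyLjust (PySem.Str.join "" (PySem.List.slice values (some pos) none)) pad_to)
    | _ :: _ =>
      bGo values pad_to rest'
        (pySetItem words iv.1
          (pyLjust (PySem.Str.join "" (PySem.List.slice values (some pos) (some (pos + L)))) pad_to))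
        (pos + L)
  termination_by rem => rem.length
  decreasing_by
    have := List.length_dropWhile_le (p := fun p => p.1 == iv.1) (l := rest)
    simp only [List.length_cons]
    omega

def get_words_from_indexes_alt (indexes : List (Int × Int)) (values : List String) (n_words : Int) (pad_to : Int) : List String :=
  bGo values pad_to indexes (List.replicate n_words.toNat (pySpaces pad_to)) 0

-- ===== PRECONDITION & SPEC =====
-- Pre_ excludes exactly the inputs where A raises IndexError: some assigned word index
-- is outside Python's wrap range [-n_words, n_words) (every element of a nonempty
-- indexes list gets its run's index assigned, so all must be in range).
def Pre_get_words_from_indexes (indexes : List (Int × Int)) (values : List String) (n_words : Int) (pad_to : Int) : Prop :=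
  indexes = [] ∨ ∀ p ∈ indexes, -n_words ≤ p.1 ∧ p.1 < n_words
instance (indexes : List (Int × Int)) (values : List String) (n_words : Int) (pad_to : Int) : Decidable (Pre_get_words_from_indexes indexes values n_words pad_to) := by unfold Pre_get_words_from_indexes; infer_instance

def pvWitness_get_words_from_indexes : (List (Int × Int)) × List String × Int × Int :=
  ([(0, 0), (0, 1), (1, 2)], ["a", "b", "c"], 2, 1)

def Spec_get_words_from_indexes (indexes : List (Int × Int)) (values : List String) (n_words : Int) (pad_to : Int) (out : List String) : Prop := out = get_words_from_indexes_alt indexes values n_words pad_to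
instance (indexes : List (Int × Int)) (values : List String) (n_words : Int) (pad_to : Int) (out : List String) : Decidable (Spec_get_words_from_indexes indexes values n_words pad_to out) := by unfold Spec_get_words_from_indexes; infer_instance

-- ===== CLAIM (what is proved, stated in full; the proofs are below) =====
def Claim_equal_get_words_from_indexes : Prop := ∀ (indexes : List (Int × Int)) (values : List String) (n_words : Int) (pad_to : Int), Dom_get_words_from_indexes indexes values n_words pad_to → Pre_get_words_from_indexes indexes values n_words pad_to → Spec_get_words_from_indexes indexes values n_words pad_to (get_words_from_indexes indexes values n_words pad_to)

-- ===== LEMMAS AND PROOFS =====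

-- A's loop across one maximal run g of word-index k starting at absolute position idx
theorem aGo_run (indexes : List (Int × Int)) (values : List String) (pad_to : Int) :
    ∀ (g : List (Int × Int)) (k : Int) (rest' : List (Int × Int)) (idx : Nat)
      (words : List String) (wb : Int),
    (∀ p ∈ g, p.1 = k) → g ≠ [] →
    indexes.drop idx = g ++ rest' →
    idx + g.length + rest'.length = indexes.length →
    (∀ p, rest'.head? = some p → p.1 ≠ k) →
    aGo indexes values pad_to (g ++ rest') idx words wb =
      match rest' with
      | [] =>
        pySetItem words k
          (pyLjust (PySem.Str.join "" (PySem.List.slice values (some wb) none)) pad_to)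
      | _ :: _ =>
        aGo indexes values pad_to rest' (idx + g.length)
          (pySetItem words k
            (pyLjust (PySem.Str.join ""
              (PySem.List.slice values (some wb) (some ((idx : Int) + (g.length : Int))))) pad_to))
          ((idx : Int) + (g.length : Int)) := by
  intro g
  induction g with
  | nil => intro k rest' idx words wb _ hne; exact absurd rfl hne
  | cons a g' ih =>
    intro k rest' idx words wb hg hne hdrop hlen hhead
    have ha : a.1 = k := hg a (List.mem_cons_self ..)
    have hget : ∀ q, (g' ++ rest').head? = some q →
        PySem.List.pyGet? indexes ((idx : Int) + 1) = some q := by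
      intro q hq
      have h2 : (List.drop idx indexes)[1]? = indexes[idx + 1]? := List.getElem?_drop
      have h1 : indexes[idx + 1]? = some q := by
        rw [← h2, hdrop]
        simpa [List.getElem?_cons, ← List.head?_eq_getElem?] using hq
      have hcast : ((idx : Int) + 1) = ((idx + 1 : Nat) : Int) := by push_cast; ring
      rw [hcast, PySem.List.pyGet?_natCast, h1]
    cases g' with
    | nil =>
      -- a is the last element of the run
      cases rest' with
      | nil =>
        have hlast : (idx : Int) = (indexes.length : Int) - 1 := by
          simp at hlen; omega
        simp [aGo, hlast, ha]
      | cons r rest'' =>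
        have hnl : ¬ ((idx : Int) = (indexes.length : Int) - 1) := by
          simp at hlen; omega
        have hr : PySem.List.pyGet? indexes ((idx : Int) + 1) = some r := by
          apply hget; simp
        have hrk : r.1 ≠ k := hhead r (by simp)
        simp only [List.nil_append, List.cons_append, aGo, if_neg hnl, hr]
        rw [if_pos (by rw [ha]; exact fun h => hrk h.symm)]
        simp [ha]
    | cons b g'' =>
      -- a is mid-run: the next element b has the same index, the loop body is a no-op
      have hb : b.1 = k := hg b (by simp)
      have hnl : ¬ ((idx : Int) = (indexes.length : Int) - 1) := by
        simp at hlen; omega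
      have hbget : PySem.List.pyGet? indexes ((idx : Int) + 1) = some b := by
        apply hget; simp
      rw [List.cons_append]
      have hunf : aGo indexes values pad_to (a :: ((b :: g'') ++ rest')) idx words wb
          = aGo indexes values pad_to ((b :: g'') ++ rest') (idx + 1) words wb := by
        rw [aGo]
        rw [if_neg hnl, hbget]
        simp [ha, hb]
      rw [hunf]
      have h3 : (List.drop idx indexes).tail = List.drop (idx + 1) indexes := List.tail_drop ..
      have hdrop' : indexes.drop (idx + 1) = (b :: g'') ++ rest' := by
        rw [← h3, hdrop]; rfl
      have hlen' : (idx + 1) + (b :: g'').length + rest'.length = indexes.length := by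
        simp at hlen ⊢; omega
      have hrec := ih k rest' (idx + 1) words wb
        (fun p hp => hg p (List.mem_cons_of_mem a hp)) (by simp) hdrop' hlen' hhead
      rw [hrec]
      cases rest' with
      | nil => rfl
      | cons r rest'' =>
        have e1 : idx + 1 + (b :: g'').length = idx + (a :: b :: g'').length := by
          simp; omega
        have e2 : (((idx + 1 : Nat)) : Int) + (((b :: g'').length : Nat) : Int)
            = (idx : Int) + (((a :: b :: g'').length : Nat) : Int) := by
          push_cast; simp; ring
        rw [e1, e2]

-- main loop correspondence: at a run start, A's w_begin equals the absolute position
theorem aGo_eq_bGo (indexes : List (Int × Int)) (values : List String) (pad_to : Int) :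
    ∀ (n : Nat) (rem : List (Int × Int)) (idx : Nat) (words : List String),
      rem.length ≤ n → indexes.drop idx = rem → idx + rem.length = indexes.length →
      aGo indexes values pad_to rem idx words (idx : Int)
        = bGo values pad_to rem words (idx : Int) := by
  intro n
  induction n with
  | zero =>
    intro rem idx words hn _ _
    have : rem = [] := List.eq_nil_of_length_eq_zero (by omega)
    subst this; simp [aGo, bGo]
  | succ n ih =>
    intro rem idx words hn hdrop hlen
    cases rem with
    | nil => simp [aGo, bGo]
    | cons iv rest =>
      have hsplit : rest.takeWhile (fun p => p.1 == iv.1)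
          ++ rest.dropWhile (fun p => p.1 == iv.1) = rest :=
        List.takeWhile_append_dropWhile
      set grp := rest.takeWhile (fun p => p.1 == iv.1) with hgrp
      set rest' := rest.dropWhile (fun p => p.1 == iv.1) with hrest'
      have hgk : ∀ p ∈ iv :: grp, p.1 = iv.1 := by
        intro p hp
        rcases List.mem_cons.mp hp with h | h
        · rw [h]
        · have := List.mem_takeWhile_imp h
          simpa using this
      have hhead : ∀ p, rest'.head? = some p → p.1 ≠ iv.1 := by
        intro p hp
        have := List.head?_dropWhile_not (p := fun p => p.1 == iv.1) (l := rest)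
        rw [← hrest', hp] at this
        simpa using this
      have hdrop2 : indexes.drop idx = (iv :: grp) ++ rest' := by
        rw [hdrop]; simp [hsplit]
      have hlenrest : grp.length + rest'.length = rest.length := by
        conv_rhs => rw [← hsplit]
        simp
      have hlen2 : idx + (iv :: grp).length + rest'.length = indexes.length := by
        simp at hlen ⊢; omega
      have hrun := aGo_run indexes values pad_to (iv :: grp) iv.1 rest' idx words (idx : Int)
        hgk (by simp) hdrop2 hlen2 hhead
      have hstep : aGo indexes values pad_to (iv :: rest) idx words (idx : Int)
          = aGo indexes values pad_to ((iv :: grp) ++ rest') idx words (idx : Int) := by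
        rw [List.cons_append, hsplit]
      rw [hstep]
      cases hr : rest' with
      | nil =>
        rw [hr] at hrun
        rw [hrun]
        conv_rhs => rw [bGo]
        simp only [← hrest', hr]
      | cons r rest'' =>
        rw [hr] at hrun
        have hred : aGo indexes values pad_to ((iv :: grp) ++ (r :: rest'')) idx words (idx : Int)
            = aGo indexes values pad_to (r :: rest'') (idx + (iv :: grp).length)
                (pySetItem words iv.1
                  (pyLjust (PySem.Str.join "" (PySem.List.slice values (some (idx : Int))
                    (some ((idx : Int) + (((iv :: grp).length : Nat) : Int))))) pad_to))
                ((idx : Int) + (((iv :: grp).length : Nat) : Int)) := hrun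
        rw [hred]
        have hc2 : (idx : Int) + (((iv :: grp).length : Nat) : Int)
            = ((idx + (iv :: grp).length : Nat) : Int) := by push_cast; ring
        rw [hc2]
        have hdrop3 : indexes.drop (idx + (iv :: grp).length) = rest' := by
          rw [← List.drop_drop, hdrop2]
          rw [List.drop_append_of_le_length (le_refl _)]
          simp
        have hlen3 : (idx + (iv :: grp).length) + rest'.length = indexes.length := by
          simp at hlen2 ⊢; omega
        have hsub : rest'.length ≤ n := by
          simp at hn; omega
        have hih := ih rest' (idx + (iv :: grp).length)
          (pySetItem words iv.1
            (pyLjust (PySem.Str.join "" (PySem.List.slice values (some (idx : Int))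
              (some ((idx + (iv :: grp).length : Nat) : Int)))) pad_to))
          hsub hdrop3 hlen3
        rw [hr] at hih
        rw [hih]
        have hcast : ((idx + (iv :: grp).length : Nat) : Int)
            = (idx : Int) + (1 + (grp.length : Int)) := by push_cast; simp; ring
        rw [hcast]
        conv_rhs => rw [bGo]
        simp only [← hrest', hr, ← hgrp]

-- ===== VERDICT (by name: the statement is the Claim_ definition above) =====
theorem get_words_from_indexes_spec : Claim_equal_get_words_from_indexes := by
  intro indexes values n_words pad_to _ _
  unfold Spec_get_words_from_indexes get_words_from_indexes get_words_from_indexes_alt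
  have := aGo_eq_bGo indexes values pad_to indexes.length indexes 0
    (List.replicate n_words.toNat (pySpaces pad_to)) (le_refl _) (by simp) (by simp)
  simpa using this
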